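-- pv_equiv track=rewrite | github.com/Crusazer/Maskara | src/core/services/anonymizer/gliner/gliner_text_chunker.py | _split_by_delimiters
-- ===== SOURCE A (Python) =====
-- def _split_by_delimiters(text: str, start_offset: int = 0) -> list[tuple[str, int, int]]:
--     """
--     Резервная разбивка по запятым и точкам с запятой с сохранением позиций.
--
--     :param text: Текст для разбиения.
--     :param start_offset: Смещение начала текста в исходном документе.
--     :return: Список кортежей (фрагмент, start, end).
--     """
--     parts = []
--     last = 0
--     for i, c in enumerate(text):
--         if c in ",;":
--             part = text[last : i + 1].strip()
--             if part:
--                 parts.append((part, start_offset + last, start_offset + i + 1))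
--             last = i + 1
--     # Добавляем остаток
--     if last < len(text):
--         part = text[last:].strip()
--         if part:
--             parts.append((part, start_offset + last, start_offset + len(text)))
--     return parts
-- ===== SOURCE B (Python) =====
-- def _split_by_delimiters(text: str, start_offset: int = 0) -> list[tuple[str, int, int]]:
--     # Tokenize first (pieces each ending in their delimiter), then a second
--     # pass assigns positions from a running offset.
--     pieces = []
--     cur = []
--     for c in text:
--         cur.append(c)
--         if c in ",;":
--             pieces.append("".join(cur))
--             cur = []
--     tail = "".join(cur)
--
--     parts = []
--     pos = 0
--     for seg in pieces:
--         s = seg.strip()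
--         if s:
--             parts.append((s, start_offset + pos, start_offset + pos + len(seg)))
--         pos += len(seg)
--     if tail:
--         s = tail.strip()
--         if s:
--             parts.append((s, start_offset + pos, start_offset + len(text)))
--     return parts
-- ===== Notes on version B (the rewrite author's own statement) =====
-- stated objective: alternative
-- what changed: B tokenizes the text into delimiter-terminated pieces first and then assigns positions in a separate second pass over the pieces with a running offset, instead of A's single indexed scan that re-slices the original string at each delimiter.
import Mathlib
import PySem

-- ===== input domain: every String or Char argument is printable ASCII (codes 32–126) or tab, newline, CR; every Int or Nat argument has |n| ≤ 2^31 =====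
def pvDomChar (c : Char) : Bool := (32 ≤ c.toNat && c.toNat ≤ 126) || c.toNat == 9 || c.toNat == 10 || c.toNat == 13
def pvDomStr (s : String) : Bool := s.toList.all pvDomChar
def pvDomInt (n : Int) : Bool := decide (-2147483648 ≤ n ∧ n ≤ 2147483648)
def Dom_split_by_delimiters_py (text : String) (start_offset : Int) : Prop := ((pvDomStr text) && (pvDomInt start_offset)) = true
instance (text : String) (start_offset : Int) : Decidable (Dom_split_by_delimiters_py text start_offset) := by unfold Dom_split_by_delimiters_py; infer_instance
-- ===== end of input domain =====

-- B re-decomposes A's single indexed scan into tokenize-then-position passes (alternative decomposition, same cost); return values proved equal on all inputs.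

-- ===== PORT A =====
-- A's loop step: on a delimiter, slice text[last:i+1], strip, append if non-empty, reset last.
def pvStepA (cs : List Char) (start_offset : Int)
    (st : List (String × Int × Int) × Int) (ic : Int × Char) : List (String × Int × Int) × Int :=
  if ic.2 = ',' ∨ ic.2 = ';' then
    let part := PySem.Chars.strip (PySem.List.slice cs (some st.2) (some (ic.1 + 1)))
    let parts := if part ≠ [] then st.1 ++ [(String.mk part, start_offset + st.2, start_offset + ic.1 + 1)] else st.1
    (parts, ic.1 + 1)
  else st

def split_by_delimiters_py (text : String) (start_offset : Int) : List (String × Int × Int) :=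
  let cs := text.toList
  let st := (PySem.List.enumerate cs 0).foldl (pvStepA cs start_offset) ([], 0)
  if st.2 < (cs.length : Int) then
    let part := PySem.Chars.strip (PySem.List.slice cs (some st.2) none)
    if part ≠ [] then st.1 ++ [(String.mk part, start_offset + st.2, start_offset + (cs.length : Int))] else st.1
  else st.1

-- ===== PORT B =====
-- B pass 1: cut the text into delimiter-terminated pieces (plus the trailing remainder).
def pvStepTok (st : List (List Char) × List Char) (c : Char) : List (List Char) × List Char :=
  let cur := st.2 ++ [c]
  if c = ',' ∨ c = ';' then (st.1 ++ [cur], []) else (st.1, cur)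

-- B pass 2: walk the pieces with a running offset, strip each, keep the non-empty ones.
def pvStepOff (start_offset : Int)
    (st : List (String × Int × Int) × Int) (seg : List Char) : List (String × Int × Int) × Int :=
  let s := PySem.Chars.strip seg
  let parts := if s ≠ [] then st.1 ++ [(String.mk s, start_offset + st.2, start_offset + st.2 + (seg.length : Int))] else st.1
  (parts, st.2 + (seg.length : Int))

def split_by_delimiters_py_alt (text : String) (start_offset : Int) : List (String × Int × Int) :=
  let cs := text.toList
  let tok := cs.foldl pvStepTok ([], [])
  let st := tok.1.foldl (pvStepOff start_offset) ([], 0)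
  if tok.2 ≠ [] then
    let s := PySem.Chars.strip tok.2
    if s ≠ [] then st.1 ++ [(String.mk s, start_offset + st.2, start_offset + (cs.length : Int))] else st.1
  else st.1

-- ===== PRECONDITION & SPEC =====
def Spec_split_by_delimiters_py (text : String) (start_offset : Int) (out : List (String × Int × Int)) : Prop := out = split_by_delimiters_py_alt text start_offset
instance (text : String) (start_offset : Int) (out : List (String × Int × Int)) : Decidable (Spec_split_by_delimiters_py text start_offset out) := by unfold Spec_split_by_delimiters_py; infer_instance

-- ===== CLAIM (what is proved, stated in full; the proofs are below) =====
def Claim_equal_split_by_delimiters_py : Prop := ∀ (text : String) (start_offset : Int), Dom_split_by_delimiters_py text start_offset → Spec_split_by_delimiters_py text start_offset (split_by_delimiters_py text start_offset)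

-- ===== LEMMAS AND PROOFS =====

-- Common recursive reference function: processes the remaining characters with the
-- pending (unfinished) segment and its starting position.
def pvCore (off : Int) : List Char → List Char → Nat → List (String × Int × Int) → List (String × Int × Int)
  | [], pending, lastPos, acc =>
      if pending ≠ [] then
        let s := PySem.Chars.strip pending
        if s ≠ [] then acc ++ [(String.mk s, off + (lastPos : Int), off + (lastPos : Int) + (pending.length : Int))] else acc
      else acc
  | c :: rs, pending, lastPos, acc =>
      if c = ',' ∨ c = ';' then
        let s := PySem.Chars.strip (pending ++ [c])
        let acc' := if s ≠ [] then acc ++ [(String.mk s, off + (lastPos : Int), off + (lastPos : Int) + ((pending.length : Int) + 1))] else acc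
        pvCore off rs [] (lastPos + pending.length + 1) acc'
      else pvCore off rs (pending ++ [c]) lastPos acc

-- A's tail postprocessing as a function of the final fold state.
def pvFinA (cs : List Char) (off : Int) (st : List (String × Int × Int) × Int) : List (String × Int × Int) :=
  if st.2 < (cs.length : Int) then
    let part := PySem.Chars.strip (PySem.List.slice cs (some st.2) none)
    if part ≠ [] then st.1 ++ [(String.mk part, off + st.2, off + (cs.length : Int))] else st.1
  else st.1

lemma pvLemA (cs : List Char) (off : Int) :
    ∀ (rest pending : List Char) (lastNat : Nat) (acc : List (String × Int × Int)),
      cs.drop lastNat = pending ++ rest →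
      cs.length = lastNat + pending.length + rest.length →
      pvFinA cs off ((PySem.List.enumerate rest ((lastNat + pending.length : Nat) : Int)).foldl (pvStepA cs off) (acc, (lastNat : Int)))
        = pvCore off rest pending lastNat acc := by
  intro rest
  induction rest with
  | nil =>
      intro pending lastNat acc hdrop hlen
      simp only [PySem.List.enumerate_nil, List.foldl_nil, pvFinA, pvCore]
      simp only [List.append_nil] at hdrop
      have hlen' : cs.length = lastNat + pending.length := by simpa using hlen
      have hlt : ((lastNat : Int) < (cs.length : Int)) ↔ pending ≠ [] := by
        rw [hlen']
        cases pending with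
        | nil => simp
        | cons p ps =>
            simp only [List.length_cons, ne_eq, reduceCtorEq, not_false_eq_true, iff_true]
            push_cast
            omega
      have hslice : PySem.List.slice cs (some (lastNat : Int)) none = pending := by
        rw [PySem.List.slice_from_natCast]; exact hdrop
      by_cases hp : pending = []
      · subst hp
        have : ¬ ((lastNat : Int) < (cs.length : Int)) := by simp [hlt]
        simp [this]
      · have h1 : (lastNat : Int) < (cs.length : Int) := hlt.mpr hp
        have hend : off + (cs.length : Int) = off + (lastNat : Int) + (pending.length : Int) := by
          rw [hlen']
          push_cast
          ring
        simp only [h1, if_true, hslice, hp, ne_eq, not_false_eq_true, if_true, hend]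
  | cons c rs ih =>
      intro pending lastNat acc hdrop hlen
      rw [PySem.List.enumerate_cons, List.foldl_cons]
      by_cases hc : c = ',' ∨ c = ';'
      · have hslice : PySem.List.slice cs (some (lastNat : Int)) (some (((lastNat + pending.length : Nat) : Int) + 1)) = pending ++ [c] := by
          have : ((lastNat + pending.length : Nat) : Int) + 1 = ((lastNat + pending.length + 1 : Nat) : Int) := by push_cast; ring
          rw [this, PySem.List.slice_natCast, hdrop]
          have : lastNat + pending.length + 1 - lastNat = pending.length + 1 := by omega
          rw [this, show pending.length + 1 = pending.length + 1 from rfl, List.take_append]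
          simp
        have hstep : pvStepA cs off (acc, (lastNat : Int)) (((lastNat + pending.length : Nat) : Int), c)
            = ((if PySem.Chars.strip (pending ++ [c]) ≠ [] then
                  acc ++ [(String.mk (PySem.Chars.strip (pending ++ [c])), off + (lastNat : Int), off + (lastNat : Int) + ((pending.length : Int) + 1))]
                else acc), ((lastNat + pending.length + 1 : Nat) : Int)) := by
          simp only [pvStepA, hc, if_true, hslice]
          have h3 : off + ((lastNat + pending.length : Nat) : Int) + 1 = off + (lastNat : Int) + ((pending.length : Int) + 1) := by push_cast; ring
          have h4 : ((lastNat + pending.length : Nat) : Int) + 1 = ((lastNat + pending.length + 1 : Nat) : Int) := by push_cast; ring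
          rw [h3, h4]
        rw [hstep]
        have hdrop' : cs.drop (lastNat + pending.length + 1) = [] ++ rs := by
          have := hdrop
          rw [show lastNat + pending.length + 1 = lastNat + (pending.length + 1) by ring, ← List.drop_drop, hdrop]
          simp
        have hlen' : cs.length = (lastNat + pending.length + 1) + List.length ([] : List Char) + rs.length := by
          simp at hlen ⊢; omega
        have := ih [] (lastNat + pending.length + 1)
          (if PySem.Chars.strip (pending ++ [c]) ≠ [] then
              acc ++ [(String.mk (PySem.Chars.strip (pending ++ [c])), off + (lastNat : Int), off + (lastNat : Int) + ((pending.length : Int) + 1))]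
            else acc) hdrop' hlen'
        simp only [List.length_nil] at this
        rw [show ((lastNat + pending.length : Nat) : Int) + 1 = ((lastNat + pending.length + 1 : Nat) : Int) by push_cast; ring]
        rw [this]
        simp only [pvCore, hc, if_true]
      · have hstep : pvStepA cs off (acc, (lastNat : Int)) (((lastNat + pending.length : Nat) : Int), c) = (acc, (lastNat : Int)) := by
          simp [pvStepA, hc]
        rw [hstep]
        have hdrop' : cs.drop lastNat = (pending ++ [c]) ++ rs := by
          rw [hdrop]; simp
        have hlen' : cs.length = lastNat + (pending ++ [c]).length + rs.length := by
          simp at hlen ⊢; omega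
        have := ih (pending ++ [c]) lastNat acc hdrop' hlen'
        simp only [List.length_append, List.length_cons, List.length_nil] at this ⊢
        rw [show lastNat + (pending.length + 1) = lastNat + pending.length + 1 by ring] at this
        rw [show ((lastNat + pending.length : Nat) : Int) + 1 = ((lastNat + pending.length + 1 : Nat) : Int) by push_cast; ring]
        rw [this]
        simp only [pvCore, hc, if_false]

-- The tokenizing fold only appends to its piece list.
lemma pvTok_append (rest : List Char) :
    ∀ (ps : List (List Char)) (cur : List Char),
      rest.foldl pvStepTok (ps, cur) = (ps ++ (rest.foldl pvStepTok ([], cur)).1, (rest.foldl pvStepTok ([], cur)).2) := by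
  induction rest with
  | nil => intro ps cur; simp
  | cons c rs ih =>
      intro ps cur
      by_cases hc : c = ',' ∨ c = ';'
      · simp only [List.foldl_cons, pvStepTok, hc, if_true, List.nil_append]
        rw [ih (ps ++ [cur ++ [c]]) [], ih [cur ++ [c]] []]
        simp
      · simp only [List.foldl_cons, pvStepTok, hc, if_false]
        exact ih ps (cur ++ [c])

-- B's tail postprocessing as a function of (pieces-fold result, pending remainder).
def pvFinB (n : Nat) (off : Int) (cur : List Char) (st : List (String × Int × Int) × Int) : List (String × Int × Int) :=
  if cur ≠ [] then
    let s := PySem.Chars.strip cur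
    if s ≠ [] then st.1 ++ [(String.mk s, off + st.2, off + (n : Int))] else st.1
  else st.1

lemma pvLemB (n : Nat) (off : Int) :
    ∀ (rest pending : List Char) (lastNat : Nat) (acc : List (String × Int × Int)),
      n = lastNat + pending.length + rest.length →
      pvFinB n off (rest.foldl pvStepTok ([], pending)).2
          (((rest.foldl pvStepTok ([], pending)).1).foldl (pvStepOff off) (acc, (lastNat : Int)))
        = pvCore off rest pending lastNat acc := by
  intro rest
  induction rest with
  | nil =>
      intro pending lastNat acc hlen
      simp only [List.foldl_nil, pvFinB, pvCore]
      by_cases hp : pending = []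
      · simp [hp]
      · have hend : off + (n : Int) = off + (lastNat : Int) + (pending.length : Int) := by
          simp at hlen; omega
        simp only [hp, ne_eq, not_false_eq_true, if_true, hend]
  | cons c rs ih =>
      intro pending lastNat acc hlen
      by_cases hc : c = ',' ∨ c = ';'
      · simp only [List.foldl_cons, pvStepTok, hc, if_true, List.nil_append]
        rw [pvTok_append rs [pending ++ [c]] []]
        simp only [List.singleton_append, List.foldl_cons]
        have hstep : pvStepOff off (acc, (lastNat : Int)) (pending ++ [c])
            = ((if PySem.Chars.strip (pending ++ [c]) ≠ [] then
                  acc ++ [(String.mk (PySem.Chars.strip (pending ++ [c])), off + (lastNat : Int), off + (lastNat : Int) + ((pending.length : Int) + 1))]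
                else acc), ((lastNat + pending.length + 1 : Nat) : Int)) := by
          have hl : (pending ++ [c]).length = pending.length + 1 := by simp
          simp only [pvStepOff, hl]
          have h3 : off + (lastNat : Int) + ((pending.length + 1 : Nat) : Int) = off + (lastNat : Int) + ((pending.length : Int) + 1) := by push_cast; ring
          have h4 : (lastNat : Int) + ((pending.length + 1 : Nat) : Int) = ((lastNat + pending.length + 1 : Nat) : Int) := by push_cast; ring
          rw [h3, h4]
        rw [hstep]
        have hlen' : n = (lastNat + pending.length + 1) + List.length ([] : List Char) + rs.length := by
          simp at hlen ⊢; omega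
        have := ih [] (lastNat + pending.length + 1)
          (if PySem.Chars.strip (pending ++ [c]) ≠ [] then
              acc ++ [(String.mk (PySem.Chars.strip (pending ++ [c])), off + (lastNat : Int), off + (lastNat : Int) + ((pending.length : Int) + 1))]
            else acc) hlen'
        rw [this]
        simp only [pvCore, hc, if_true]
      · simp only [List.foldl_cons, pvStepTok, hc, if_false]
        have hlen' : n = lastNat + (pending ++ [c]).length + rs.length := by
          simp at hlen ⊢; omega
        have := ih (pending ++ [c]) lastNat acc hlen'
        rw [this]
        simp only [pvCore, hc, if_false]

-- ===== VERDICT (by name: the statement is the Claim_ definition above) =====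
theorem split_by_delimiters_py_spec : Claim_equal_split_by_delimiters_py := by
  intro text off _
  unfold Spec_split_by_delimiters_py split_by_delimiters_py split_by_delimiters_py_alt
  have hA := pvLemA text.toList off text.toList [] 0 [] (by simp) (by simp)
  have hB := pvLemB text.toList.length off text.toList [] 0 [] (by simp)
  simp only [List.length_nil, Nat.add_zero, Nat.cast_zero] at hA hB
  calc _ = pvFinA text.toList off ((PySem.List.enumerate text.toList 0).foldl (pvStepA text.toList off) ([], 0)) := rfl
    _ = pvCore off text.toList [] 0 [] := hA
    _ = _ := by
        rw [← hB]
        rfl
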